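-- pv_equiv track=rewrite | github.com/venkateshwara-gopisetti/directory-tree-generator-python | treewalk/test2.py | _sort_tree
-- ===== SOURCE A (Python) =====
-- def _sort_tree(tree):
-- 	tree.sort()
-- 	dirs = [x for x in tree if x[2]]
--
-- 	output = []
-- 	leftover = []
--
-- 	for dire in dirs:
-- 		output.append(dire)
-- 		flags = [0]*len(tree)
-- 		for idx, branch in enumerate(tree):
-- 			if branch[2]:
-- 				flags[idx] = 1
-- 			elif branch[0][:-1] == dire[0]:
-- 				output.append(branch)
-- 				flags[idx] = 1
-- 		tree = [tree[x] for x in range(len(tree)) if flags[x]==0]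
--
-- 	return output + tree
-- ===== SOURCE B (Python) =====
-- def _sort_tree(tree):
-- 	# Same return value as A; sorts `tree` in place first (same side effect as A).
-- 	tree.sort()
-- 	groups = {}
-- 	for x in tree:
-- 		if not x[2]:
-- 			groups.setdefault(tuple(x[0][:-1]), []).append(x)
-- 	out = []
-- 	for d in tree:
-- 		if d[2]:
-- 			out.append(d)
-- 			out.extend(groups.pop(tuple(d[0]), []))
-- 	return out + [x for x in tree if not x[2] and tuple(x[0][:-1]) in groups]
-- ===== Notes on version B (the rewrite author's own statement) =====
-- stated objective: faster
-- what changed: Instead of rescanning and rebuilding the remaining list once per directory with an index/flags pass, B sorts once, groups the leaves by parent path in a dict in one pass, and emits each directory followed by its popped group in a single sweep.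
import Mathlib
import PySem

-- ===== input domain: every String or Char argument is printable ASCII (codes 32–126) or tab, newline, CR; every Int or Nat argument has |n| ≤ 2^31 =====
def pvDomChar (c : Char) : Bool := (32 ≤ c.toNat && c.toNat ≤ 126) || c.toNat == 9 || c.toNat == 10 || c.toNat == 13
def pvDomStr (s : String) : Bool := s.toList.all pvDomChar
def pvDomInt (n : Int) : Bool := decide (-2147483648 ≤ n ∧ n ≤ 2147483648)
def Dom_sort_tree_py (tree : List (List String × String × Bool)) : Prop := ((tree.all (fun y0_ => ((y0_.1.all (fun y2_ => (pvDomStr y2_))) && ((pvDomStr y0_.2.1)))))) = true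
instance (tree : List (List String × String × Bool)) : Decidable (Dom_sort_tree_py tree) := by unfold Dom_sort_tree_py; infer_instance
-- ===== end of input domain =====

-- B groups the leaves by parent path in a dict built in one pass, then emits each sorted directory
-- followed by its group: O(n log n) instead of A's rescan of the whole list per directory.
-- Both A and B sort the argument list in place first (same side effect); the theorems are about the return value.

abbrev TreeEnt : Type := List String × String × Bool

-- shared helper: `tree.sort()` — hand-ported as a stable insertion sort with Python's
-- tuple `__lt__` on (list[str], str, bool) (lexicographic; list compare elementwise, bool False < True);
-- exact for Python's stable sort, which compares only with `<`.
def strListLt : List String → List String → Bool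
  | [], [] => false
  | [], _ :: _ => true
  | _ :: _, [] => false
  | a :: as, b :: bs => if a < b then true else if b < a then false else strListLt as bs

def entLt (a b : TreeEnt) : Bool :=
  if strListLt a.1 b.1 then true
  else if strListLt b.1 a.1 then false
  else if a.2.1 < b.2.1 then true
  else if b.2.1 < a.2.1 then false
  else !a.2.2 && b.2.2

def insEnt (x : TreeEnt) : List TreeEnt → List TreeEnt
  | [] => [x]
  | y :: ys => if entLt x y then x :: y :: ys else y :: insEnt x ys

def pySortTree (t : List TreeEnt) : List TreeEnt := t.foldl (fun acc x => insEnt x acc) []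

-- ===== PORT A =====
-- body of A's `for dire in dirs` loop (inner flags loop + list rebuild, step for step)
def aStep (st : List TreeEnt × List TreeEnt) (dire : TreeEnt) : List TreeEnt × List TreeEnt :=
  let output := st.1 ++ [dire]
  let flags : List Int := List.replicate st.2.length 0
  let st2 := (PySem.List.enumerate st.2).foldl (fun (p : List TreeEnt × List Int) ib =>
      if ib.2.2.2 then (p.1, PySem.List.pySetD p.2 ib.1 1)
      else if PySem.List.slice ib.2.1 none (some (-1)) = dire.1 then
        (p.1 ++ [ib.2], PySem.List.pySetD p.2 ib.1 1)
      else p) (output, flags)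
  let newtree := ((PySem.List.pyRange 0 (PySem.List.len st.2) 1).filter
      (fun x => PySem.List.pyGetD st2.2 x 0 == 0)).map (fun x => PySem.List.pyGetD st.2 x ([], "", false))
  (st2.1, newtree)

def sort_tree_py (tree : List TreeEnt) : List TreeEnt :=
  let tree := pySortTree tree
  let dirs := tree.filter (fun x => x.2.2)
  let res := dirs.foldl aStep ([], tree)
  res.1 ++ res.2

-- ===== PORT B =====
-- groups.setdefault(tuple(x[0][:-1]), []).append(x)
def bGroup (g : PySem.Dict (List String) (List TreeEnt)) (x : TreeEnt) :
    PySem.Dict (List String) (List TreeEnt) :=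
  if !x.2.2 then g.modify (PySem.List.slice x.1 none (some (-1))) [] (· ++ [x]) else g

-- out.append(d); out.extend(groups.pop(tuple(d[0]), []))
def bStep (st : List TreeEnt × PySem.Dict (List String) (List TreeEnt)) (d : TreeEnt) :
    List TreeEnt × PySem.Dict (List String) (List TreeEnt) :=
  if d.2.2 then (st.1 ++ [d] ++ st.2.getD d.1 [], st.2.erase d.1) else st

def sort_tree_py_alt (tree : List TreeEnt) : List TreeEnt :=
  let tree := pySortTree tree
  let groups := tree.foldl bGroup PySem.Dict.empty
  let st := tree.foldl bStep ([], groups)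
  st.1 ++ tree.filter (fun x => !x.2.2 && st.2.contains (PySem.List.slice x.1 none (some (-1))))

-- ===== PRECONDITION & SPEC =====
def Spec_sort_tree_py (tree : List (List String × String × Bool)) (out : List (List String × String × Bool)) : Prop := out = sort_tree_py_alt tree
instance (tree : List (List String × String × Bool)) (out : List (List String × String × Bool)) : Decidable (Spec_sort_tree_py tree out) := by unfold Spec_sort_tree_py; infer_instance

-- ===== CLAIM (what is proved, stated in full; the proofs are below) =====
def Claim_equal_sort_tree_py : Prop := ∀ (tree : List (List String × String × Bool)), Dom_sort_tree_py tree → Spec_sort_tree_py tree (sort_tree_py tree)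

-- ===== LEMMAS AND PROOFS =====

-- Dict.erase facts (Dict.erase filters the items list)
theorem dict_find?_filter_ne {α : Type} (l : List (List String × α)) (k p : List String) :
    (l.filter (fun q => !(q.1 == k))).find? (fun q => q.1 == p)
      = if p = k then none else l.find? (fun q => q.1 == p) := by
  induction l with
  | nil => simp only [List.filter_nil, List.find?_nil]; split <;> rfl
  | cons q rest ih =>
    by_cases h1 : q.1 = k
    · by_cases h2 : p = k
      · simp [h1, h2]
      · have hqp : ¬ q.1 = p := fun h => h2 (h.symm.trans h1)
        have hkp : (k == p) = false := beq_eq_false_iff_ne.mpr (fun h => h2 h.symm)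
        simp [h1, ih, h2, hkp]
    · by_cases h2 : q.1 = p
      · have hpk : ¬ p = k := fun h => h1 (h2.trans h)
        simp [h2, hpk]
      · simp [h1, h2, ih]

theorem dict_get?_erase {ν : Type} (d : PySem.Dict (List String) ν) (k p : List String) :
    (d.erase k).get? p = if p = k then none else d.get? p := by
  obtain ⟨items⟩ := d
  simp only [PySem.Dict.erase, PySem.Dict.get?, dict_find?_filter_ne]
  split <;> rfl

theorem dict_getD_erase {ν : Type} (d : PySem.Dict (List String) ν) (k p : List String) (d0 : ν) :
    (d.erase k).getD p d0 = if p = k then d0 else d.getD p d0 := by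
  simp only [PySem.Dict.getD, dict_get?_erase]
  split <;> rfl

theorem dict_contains_erase {ν : Type} (d : PySem.Dict (List String) ν) (k p : List String) :
    (d.erase k).contains p = (d.contains p && !(p == k)) := by
  rw [PySem.Dict.contains_eq_isSome_get?, PySem.Dict.contains_eq_isSome_get?, dict_get?_erase]
  by_cases h : p = k <;> simp [h]

-- the flag A's inner loop writes for a branch
def flagF (dire : TreeEnt) (b : TreeEnt) : Int :=
  if b.2.2 = true then 1 else if b.1.dropLast = dire.1 then 1 else 0

-- A's inner flags loop, characterised (enumerate start k, flags = pre ++ zeros)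
theorem aInner (dire : TreeEnt) : ∀ (t : List TreeEnt) (k : Nat) (out : List TreeEnt) (pre : List Int),
    pre.length = k →
    ((PySem.List.enumerate t (k : Int)).foldl (fun (p : List TreeEnt × List Int) ib =>
      if ib.2.2.2 then (p.1, PySem.List.pySetD p.2 ib.1 1)
      else if PySem.List.slice ib.2.1 none (some (-1)) = dire.1 then
        (p.1 ++ [ib.2], PySem.List.pySetD p.2 ib.1 1)
      else p) (out, pre ++ List.replicate t.length 0))
    = (out ++ t.filter (fun b => !b.2.2 && b.1.dropLast == dire.1), pre ++ t.map (flagF dire)) := by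
  intro t
  induction t with
  | nil => intro k out pre hk; simp [PySem.List.enumerate_nil]
  | cons x xs ih =>
    intro k out pre hk
    have hset : PySem.List.pySetD (pre ++ List.replicate (xs.length + 1) 0) ((k : Nat) : Int) 1
        = (pre ++ [1]) ++ List.replicate xs.length 0 := by
      rw [PySem.List.pySetD_natCast, List.replicate_succ, List.set_append_right _ _ hk.le]
      simp [hk]
    have hcast : (k : Int) + 1 = ((k + 1 : Nat) : Int) := by push_cast; ring
    rw [PySem.List.enumerate_cons, List.foldl_cons]
    dsimp only
    simp only [PySem.List.slice_to_neg_one] at ih ⊢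
    rw [List.length_cons]
    by_cases hx : x.2.2 = true
    · rw [if_pos hx, hset, hcast, ih (k + 1) out (pre ++ [1]) (by simp [hk])]
      simp [flagF, hx]
    · rw [if_neg hx]
      by_cases hm : x.1.dropLast = dire.1
      · rw [if_pos hm, hset, hcast, ih (k + 1) (out ++ [x]) (pre ++ [1]) (by simp [hk])]
        simp [flagF, hx, hm]
      · rw [if_neg hm,
            show pre ++ List.replicate (xs.length + 1) 0 = (pre ++ [0]) ++ List.replicate xs.length 0 by
              rw [List.replicate_succ]; simp,
            hcast, ih (k + 1) out (pre ++ [0]) (by simp [hk])]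
        simp [flagF, hx, hm]

-- the inner loop as the port calls it (start 0, all-zero flags)
theorem aInner0 (dire : TreeEnt) (t out : List TreeEnt) :
    ((PySem.List.enumerate t).foldl (fun (p : List TreeEnt × List Int) ib =>
      if ib.2.2.2 then (p.1, PySem.List.pySetD p.2 ib.1 1)
      else if PySem.List.slice ib.2.1 none (some (-1)) = dire.1 then
        (p.1 ++ [ib.2], PySem.List.pySetD p.2 ib.1 1)
      else p) (out, List.replicate t.length 0))
    = (out ++ t.filter (fun b => !b.2.2 && b.1.dropLast == dire.1), t.map (flagF dire)) := by
  have h := aInner dire t 0 out [] rfl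
  simpa using h

-- the rebuild comprehension, on Nat indices
theorem rebuild_core (f : TreeEnt → Int) (t : List TreeEnt) :
    ((List.range t.length).filter (fun k => (t.map f).getD k 0 == 0)).map
      (fun k => t.getD k ([], "", false)) = t.filter (fun b => f b == 0) := by
  induction t using List.reverseRecOn with
  | nil => simp
  | append_singleton t x ih =>
    rw [List.length_append, List.length_singleton, List.range_succ, List.filter_append,
        List.map_append, List.filter_append]
    have h1 : (List.range t.length).filter (fun k => ((t ++ [x]).map f).getD k 0 == 0)
        = (List.range t.length).filter (fun k => (t.map f).getD k 0 == 0) := by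
      apply List.filter_congr
      intro k hk
      have hk' : k < t.length := List.mem_range.mp hk
      rw [List.map_append, List.getD_append _ _ _ _ (by rw [List.length_map]; exact hk')]
    have h2 : ((List.range t.length).filter (fun k => (t.map f).getD k 0 == 0)).map
          (fun k => (t ++ [x]).getD k ([], "", false))
        = ((List.range t.length).filter (fun k => (t.map f).getD k 0 == 0)).map
          (fun k => t.getD k ([], "", false)) := by
      apply List.map_congr_left
      intro k hk
      have hk' : k < t.length := List.mem_range.mp (List.mem_filter.mp hk).1
      rw [List.getD_append _ _ _ _ hk']
    rw [h1, h2, ih]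
    by_cases hfx : f x == 0 <;> simp [hfx]

theorem aStep_eq (st : List TreeEnt × List TreeEnt) (dire : TreeEnt) :
    aStep st dire
      = (st.1 ++ [dire] ++ st.2.filter (fun b => !b.2.2 && b.1.dropLast == dire.1),
         st.2.filter (fun b => !b.2.2 && !(b.1.dropLast == dire.1))) := by
  simp only [aStep]
  rw [aInner0 dire st.2 (st.1 ++ [dire])]
  have hr : ((PySem.List.pyRange 0 (PySem.List.len st.2) 1).filter
        (fun i => PySem.List.pyGetD (st.2.map (flagF dire)) i 0 == 0)).map
        (fun i => PySem.List.pyGetD st.2 i ([], "", false))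
      = st.2.filter (fun b => flagF dire b == 0) := by
    rw [PySem.List.len_eq, PySem.List.pyRange_zero_nat, List.filter_map, List.map_map]
    have hrc := rebuild_core (flagF dire) st.2
    simpa [Function.comp_def] using hrc
  rw [hr]
  congr 1
  apply List.filter_congr
  intro b _
  unfold flagF
  by_cases hb : b.2.2 = true <;> by_cases hm : b.1.dropLast = dire.1 <;> simp [hb, hm]

-- B's grouping loop skips directories: fold over the leaves only
theorem bGroup_foldl (l : List TreeEnt) (g : PySem.Dict (List String) (List TreeEnt)) :
    l.foldl bGroup g
      = (l.filter (fun x => !x.2.2)).foldl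
          (fun g x => g.modify x.1.dropLast [] (· ++ [x])) g := by
  induction l generalizing g with
  | nil => rfl
  | cons x xs ih =>
    by_cases hx : x.2.2 = true <;>
      simp [bGroup, PySem.List.slice_to_neg_one, hx, ih]

-- B's output loop skips leaves: fold over the directories only
theorem bStep_foldl (l : List TreeEnt)
    (st : List TreeEnt × PySem.Dict (List String) (List TreeEnt)) :
    l.foldl bStep st = (l.filter (fun x => x.2.2)).foldl bStep st := by
  induction l generalizing st with
  | nil => rfl
  | cons x xs ih =>
    by_cases hx : x.2.2 = true
    · simp [hx, ih]
    · simp [hx, ih, show bStep st x = st by simp [bStep, hx]]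

-- the group dict, characterised: its value at p is the list of leaves with parent p
theorem g0_getD (l : List TreeEnt) (p : List String) :
    (l.foldl bGroup PySem.Dict.empty).getD p []
      = l.filter (fun b => !b.2.2 && b.1.dropLast == p) := by
  rw [bGroup_foldl]
  have hfm := List.foldl_map (f := fun x : TreeEnt => (x.1.dropLast, x))
    (g := fun (d : PySem.Dict (List String) (List TreeEnt)) q => d.modify q.1 [] (· ++ [q.2]))
    (l := l.filter (fun x => !x.2.2)) (init := PySem.Dict.empty)
  dsimp only at hfm
  rw [← hfm, PySem.Dict.getD_foldl_modify_append, PySem.Dict.getD_empty,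
      List.filter_map, List.map_map, List.nil_append]
  rw [show ((fun q : (List String) × TreeEnt => q.1 == p) ∘ (fun x : TreeEnt => (x.1.dropLast, x)))
        = (fun x : TreeEnt => x.1.dropLast == p) from rfl,
      show ((fun x : (List String) × TreeEnt => x.2) ∘ (fun x : TreeEnt => (x.1.dropLast, x)))
        = (fun x : TreeEnt => x) from rfl,
      List.map_id', List.filter_filter]
  apply List.filter_congr
  intro b _
  by_cases hb : b.2.2 = true <;> by_cases hm : b.1.dropLast = p <;> simp [hb, hm]

-- the group dict's keys: p is present iff some leaf has parent p
theorem g0_contains (l : List TreeEnt) (p : List String) :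
    (l.foldl bGroup PySem.Dict.empty).contains p = true
      ↔ ∃ x ∈ l, x.2.2 = false ∧ x.1.dropLast = p := by
  rw [bGroup_foldl, PySem.Dict.contains_iff_mem_keys,
      PySem.Dict.keys_foldl_modify_key (key := fun x : TreeEnt => x.1.dropLast),
      PySem.Dict.keys_empty, PySem.Set.update_nil_left, PySem.Set.mem_ofList]
  simp only [List.mem_map, List.mem_filter]
  constructor
  · rintro ⟨x, ⟨hx, hl⟩, hp⟩
    exact ⟨x, hx, by simpa using hl, hp⟩
  · rintro ⟨x, hx, hl, hp⟩
    exact ⟨x, ⟨hx, by simp [hl]⟩, hp⟩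

theorem main_lemma (s : List TreeEnt) (ds : List TreeEnt) :
    ∀ (t : List TreeEnt) (g : PySem.Dict (List String) (List TreeEnt)) (out : List TreeEnt),
    (∀ d ∈ ds, d.2.2 = true) →
    t = s.filter (fun x => !x.2.2 && g.contains x.1.dropLast) →
    (∀ p, g.getD p [] = t.filter (fun b => !b.2.2 && b.1.dropLast == p)) →
    (ds.foldl aStep (out, t)).1 ++ (ds.foldl aStep (out, t)).2
      = (ds.foldl bStep (out, g)).1
        ++ s.filter (fun x => !x.2.2 && (ds.foldl bStep (out, g)).2.contains x.1.dropLast) := by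
  induction ds with
  | nil =>
    intro t g out _ h1 _
    simp only [List.foldl_nil]
    rw [← h1]
  | cons d ds ih =>
    intro t g out hdir h1 h2
    have hd : d.2.2 = true := hdir d (by simp)
    rw [List.foldl_cons, List.foldl_cons, aStep_eq,
        show bStep (out, g) d = (out ++ [d] ++ g.getD d.1 [], g.erase d.1) by simp [bStep, hd]]
    rw [h2 d.1]
    apply ih _ _ _ (fun x hx => hdir x (List.mem_cons_of_mem _ hx))
    · -- Inv1 for the new state
      rw [h1, List.filter_filter]
      apply List.filter_congr
      intro x hx
      by_cases hxl : x.2.2 = true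
      · simp [hxl]
      · by_cases hxc : g.contains x.1.dropLast = true
        · simp [hxl, hxc, dict_contains_erase]
        · simp [hxl, hxc, dict_contains_erase]
    · -- Inv2 for the new state
      intro p
      rw [dict_getD_erase]
      by_cases hp : p = d.1
      · rw [if_pos hp, hp, List.filter_filter, Eq.comm, List.filter_eq_nil_iff]
        intro b _
        by_cases hbd : b.1.dropLast = d.1 <;> simp [hbd]
      · rw [if_neg hp, h2 p, List.filter_filter]
        apply List.filter_congr
        intro b _
        by_cases hb : b.2.2 = true
        · simp [hb]
        · by_cases hbp : b.1.dropLast = p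
          · simp [hb, hbp]
            exact hp
          · simp [hb, hbp]

-- ===== VERDICT (by name: the statement is the Claim_ definition above) =====
theorem sort_tree_py_spec : Claim_equal_sort_tree_py := by
  intro tree _
  show sort_tree_py tree = sort_tree_py_alt tree
  simp only [sort_tree_py, sort_tree_py_alt, PySem.List.slice_to_neg_one]
  rw [bStep_foldl]
  rcases hd : (pySortTree tree).filter (fun x => x.2.2) with _ | ⟨d, ds⟩
  · -- no directories: everything in the sorted list is a leaf
    rw [hd, List.foldl_nil, List.foldl_nil]
    have hleaf : ∀ x ∈ pySortTree tree, x.2.2 = false := by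
      intro x hx
      have := List.filter_eq_nil_iff.mp hd x hx
      simpa using this
    have hfull : (pySortTree tree).filter
        (fun x => !x.2.2 && ((pySortTree tree).foldl bGroup PySem.Dict.empty).contains x.1.dropLast)
        = pySortTree tree := by
      apply List.filter_eq_self.mpr
      intro x hx
      have hcx : ((pySortTree tree).foldl bGroup PySem.Dict.empty).contains x.1.dropLast = true :=
        (g0_contains _ _).mpr ⟨x, hx, hleaf x hx, rfl⟩
      simp [hleaf x hx, hcx]
    simp [hfull]
  · -- at least one directory: do the first step by hand, then the invariant carries
    have hds : ∀ y ∈ d :: ds, y.2.2 = true := by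
      intro y hy
      have : y ∈ (pySortTree tree).filter (fun x => x.2.2) := hd ▸ hy
      exact (List.mem_filter.mp this).2
    have hdd : d.2.2 = true := hds d (by simp)
    rw [hd, List.foldl_cons, List.foldl_cons, aStep_eq,
        show bStep ([], (pySortTree tree).foldl bGroup PySem.Dict.empty) d
          = ([] ++ [d] ++ ((pySortTree tree).foldl bGroup PySem.Dict.empty).getD d.1 [],
             ((pySortTree tree).foldl bGroup PySem.Dict.empty).erase d.1) by simp [bStep, hdd]]
    rw [g0_getD]
    apply main_lemma _ _ _ _ _ (fun x hx => hds x (List.mem_cons_of_mem _ hx))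
    · -- Inv1 after the first step
      apply List.filter_congr
      intro x hx
      by_cases hxl : x.2.2 = true
      · simp [hxl]
      · have hcx : ((pySortTree tree).foldl bGroup PySem.Dict.empty).contains x.1.dropLast = true :=
          (g0_contains _ _).mpr ⟨x, hx, by simpa using hxl, rfl⟩
        simp [hxl, dict_contains_erase, hcx]
    · -- Inv2 after the first step
      intro p
      rw [dict_getD_erase]
      by_cases hp : p = d.1
      · rw [if_pos hp, hp, List.filter_filter, Eq.comm, List.filter_eq_nil_iff]
        intro b _
        by_cases hbd : b.1.dropLast = d.1 <;> simp [hbd]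
      · rw [if_neg hp, g0_getD, List.filter_filter]
        apply List.filter_congr
        intro b _
        by_cases hb : b.2.2 = true
        · simp [hb]
        · by_cases hbp : b.1.dropLast = p
          · simp [hb, hbp]
            exact hp
          · simp [hb, hbp]
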